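-- pv_equiv track=rewrite | github.com/v-pun215/zcoc | zco2024/vegetables_ai.py | simulate_k_steps
-- ===== SOURCE A (Python) =====
-- def total(A, B):
--     """Return sum_i A[i]*B[i] as integer."""
--     s = 0
--     for a, b in zip(A, B):
--         s += a * b
--     return s
--
-- def one_step_best(A, B):
--     """
--     Consider all valid single-unit operations:
--       - reduce A[i] by 1 if A[i] > 0
--       - reduce B[i] by 1 if B[i] > 0
--     Return a tuple (best_total, best_i, best_type, newA, newB)
--     where best_type is 'A' or 'B'. If no operation possible (all zero), return None.
--     """
--     n = len(A)
--     cur_total = total(A, B)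
--     best_total = cur_total
--     best_i = -1
--     best_type = None
--     bestA = None
--     bestB = None
--
--     # Try every possible single decrement
--     for i in range(n):
--         a = A[i]
--         b = B[i]
--         if a > 0:
--             # simulate reducing A[i]
--             newA = A.copy()
--             newA[i] = a - 1
--             t = total(newA, B)
--             if t < best_total:
--                 best_total = t
--                 best_i = i
--                 best_type = 'A'
--                 bestA = newA
--                 bestB = B.copy()
--         if b > 0:
--             # simulate reducing B[i]
--             newB = B.copy()
--             newB[i] = b - 1
--             t = total(A, newB)
--             if t < best_total:
--                 best_total = t
--                 best_i = i
--                 best_type = 'B'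
--                 bestA = A.copy()
--                 bestB = newB
--
--     if best_type is None:
--         return None  # no valid operation
--     return best_total, best_i, best_type, bestA, bestB
--
-- def simulate_k_steps(A_orig, B_orig, k):
--     """
--     Apply one-step-best greedily for k steps (or until no operations possible).
--     Returns (final_total, finalA, finalB).
--     """
--     A = A_orig.copy()
--     B = B_orig.copy()
--
--     for step in range(k):
--         res = one_step_best(A, B)
--         if res is None:
--             break
--         best_total, best_i, best_type, newA, newB = res
--         A, B = newA, newB
--     return total(A, B), A, B
-- ===== SOURCE B (Python) =====
-- def simulate_k_steps(A_orig, B_orig, k):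
--     """
--     O(k*n) re-implementation: per step, pick the single decrement with the
--     largest positive drop in sum(A[i]*B[i]) directly from the values
--     (decrementing A[i] drops the total by B[i], and vice versa), keeping a
--     running total instead of recomputing it for every candidate.
--     """
--     A = list(A_orig)
--     B = list(B_orig)
--     n = len(A)
--     s = sum(a * b for a, b in zip(A, B))
--     steps = k
--     while steps > 0:
--         best_gain = 0
--         best_i = -1
--         best_is_a = False
--         for i in range(n):
--             if A[i] > 0 and B[i] > best_gain:
--                 best_gain = B[i]
--                 best_i = i
--                 best_is_a = True
--             if B[i] > 0 and A[i] > best_gain: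
--                 best_gain = A[i]
--                 best_i = i
--                 best_is_a = False
--         if best_i < 0:
--             break
--         if best_is_a:
--             A[best_i] -= 1
--         else:
--             B[best_i] -= 1
--         s -= best_gain
--         steps -= 1
--     return s, A, B
-- ===== Notes on version B (the rewrite author's own statement) =====
-- stated objective: faster
-- what changed: Instead of simulating every candidate decrement by copying the list and re-summing all products, B keeps a running total and finds the best move in one pass per step from the values themselves (decrementing A[i] drops the total by exactly B[i], and vice versa), turning each greedy step from O(n^2) into O(n).
import Mathlib
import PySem

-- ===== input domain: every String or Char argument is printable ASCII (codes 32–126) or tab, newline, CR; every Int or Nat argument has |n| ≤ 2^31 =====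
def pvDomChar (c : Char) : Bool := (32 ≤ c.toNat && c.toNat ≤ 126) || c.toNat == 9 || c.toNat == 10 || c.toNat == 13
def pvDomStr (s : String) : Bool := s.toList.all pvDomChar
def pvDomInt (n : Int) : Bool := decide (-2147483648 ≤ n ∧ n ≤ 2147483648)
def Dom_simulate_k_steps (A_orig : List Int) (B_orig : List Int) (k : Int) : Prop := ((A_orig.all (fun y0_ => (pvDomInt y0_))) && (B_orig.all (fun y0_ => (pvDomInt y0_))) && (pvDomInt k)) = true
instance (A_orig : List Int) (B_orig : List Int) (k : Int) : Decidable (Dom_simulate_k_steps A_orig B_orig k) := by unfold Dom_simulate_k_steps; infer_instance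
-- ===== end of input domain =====

-- B replaces A's per-candidate list copy + full re-summation by a running total and a
-- one-pass argmax over the direct per-index drops (O(k*n) instead of O(k*n^2)); return
-- values agree on every input where A returns (A raises IndexError when k ≥ 1 and
-- len(A_orig) > len(B_orig); those inputs are excluded by Pre_).

-- ===== PORT A =====
-- total(A, B): s = 0; for a, b in zip(A, B): s += a*b
def pyTotal (A B : List Int) : Int :=
  (A.zip B).foldl (fun s p => s + p.1 * p.2) 0

-- state of one_step_best's loop: (best_total, best_i, best_type, bestA, bestB)
abbrev StA := Int × Int × Option String × Option (List Int) × Option (List Int)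

-- body of one_step_best's `for i in range(n)` loop.
-- A[i] and B[i] are ported as getD: i ranges over range(len(A)) so A[i] is always in
-- range, and Pre_ guarantees len(A) ≤ len(B), so B[i] is in range too (getD is exact
-- on in-range indices; out of range Python raises, excluded by Pre_).
def stepA (A B : List Int) (st : StA) (i : Nat) : StA :=
  let a := A.getD i 0
  let b := B.getD i 0
  let st1 :=
    if a > 0 then
      let newA := A.set i (a - 1)
      let t := pyTotal newA B
      if t < st.1 then (t, (i : Int), some "A", some newA, some B) else st
    else st
  if b > 0 then
    let newB := B.set i (b - 1)
    let t := pyTotal A newB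
    if t < st1.1 then (t, (i : Int), some "B", some A, some newB) else st1
  else st1

-- one_step_best: returns None iff best_type is None (when best_type is set, bestA and
-- bestB are always set too, so the fall-through match arms are unreachable).
def oneStepBest (A B : List Int) : Option (Int × Int × String × List Int × List Int) :=
  match (List.range A.length).foldl (stepA A B) (pyTotal A B, -1, none, none, none) with
  | (bt, bi, some ty, some bA, some bB) => some (bt, bi, ty, bA, bB)
  | _ => none

-- `for step in range(k)` with the break on res is None
def simLoopA : Nat → List Int → List Int → List Int × List Int
  | 0, A, B => (A, B)
  | m + 1, A, B =>
    match oneStepBest A B with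
    | none => (A, B)
    | some (_, _, _, nA, nB) => simLoopA m nA nB

def simulate_k_steps (A_orig : List Int) (B_orig : List Int) (k : Int) : Int × List Int × List Int :=
  let p := simLoopA k.toNat A_orig B_orig
  (pyTotal p.1 p.2, p.1, p.2)

-- ===== PORT B =====
-- body of B's inner `for i in range(n)` pass: state (best_gain, best_i, best_is_a)
def stepB (A B : List Int) (st : Int × Int × Bool) (i : Nat) : Int × Int × Bool :=
  let st1 := if A.getD i 0 > 0 ∧ B.getD i 0 > st.1 then (B.getD i 0, (i : Int), true) else st
  if B.getD i 0 > 0 ∧ A.getD i 0 > st1.1 then (A.getD i 0, (i : Int), false) else st1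

def altBest (A B : List Int) : Int × Int × Bool :=
  (List.range A.length).foldl (stepB A B) (0, -1, false)

-- B's `while steps > 0` loop carrying the running total s
def altLoop : Nat → List Int → List Int → Int → Int × List Int × List Int
  | 0, A, B, s => (s, A, B)
  | m + 1, A, B, s =>
    let r := altBest A B
    if r.2.1 < 0 then (s, A, B)
    else
      altLoop m (if r.2.2 then A.set r.2.1.toNat (A.getD r.2.1.toNat 0 - 1) else A)
                (if r.2.2 then B else B.set r.2.1.toNat (B.getD r.2.1.toNat 0 - 1))
                (s - r.1)

def simulate_k_steps_alt (A_orig : List Int) (B_orig : List Int) (k : Int) : Int × List Int × List Int :=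
  altLoop k.toNat A_orig B_orig (pyTotal A_orig B_orig)

-- ===== PRECONDITION & SPEC =====
-- Python A raises IndexError (`b = B[i]` in one_step_best) exactly when k ≥ 1 and
-- len(A_orig) > len(B_orig); Pre_ excludes precisely those raising inputs and nothing else.
def Pre_simulate_k_steps (A_orig : List Int) (B_orig : List Int) (k : Int) : Prop :=
  1 ≤ k → A_orig.length ≤ B_orig.length
instance (A_orig : List Int) (B_orig : List Int) (k : Int) : Decidable (Pre_simulate_k_steps A_orig B_orig k) := by unfold Pre_simulate_k_steps; infer_instance

def pvWitness_simulate_k_steps : List Int × List Int × Int := ([2, 1], [1, 3], 3)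

def Spec_simulate_k_steps (A_orig : List Int) (B_orig : List Int) (k : Int) (out : Int × List Int × List Int) : Prop := out = simulate_k_steps_alt A_orig B_orig k
instance (A_orig : List Int) (B_orig : List Int) (k : Int) (out : Int × List Int × List Int) : Decidable (Spec_simulate_k_steps A_orig B_orig k out) := by unfold Spec_simulate_k_steps; infer_instance

-- ===== CLAIM (what is proved, stated in full; the proofs are below) =====
def Claim_equal_simulate_k_steps : Prop := ∀ (A_orig : List Int) (B_orig : List Int) (k : Int), Dom_simulate_k_steps A_orig B_orig k → Pre_simulate_k_steps A_orig B_orig k → Spec_simulate_k_steps A_orig B_orig k (simulate_k_steps A_orig B_orig k)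

-- ===== LEMMAS AND PROOFS =====

lemma tot_shift (l : List (Int × Int)) (c : Int) :
    l.foldl (fun s p => s + p.1 * p.2) c = c + l.foldl (fun s p => s + p.1 * p.2) 0 := by
  induction l generalizing c with
  | nil => simp
  | cons p l ih => simp only [List.foldl_cons]; rw [ih, ih (0 + p.1 * p.2)]; ring

lemma tot_cons (a b : Int) (A B : List Int) :
    pyTotal (a :: A) (b :: B) = a * b + pyTotal A B := by
  simp only [pyTotal, List.zip_cons_cons, List.foldl_cons]
  rw [tot_shift]; ring

lemma totA (A : List Int) : ∀ (B : List Int) (i : Nat), i < A.length → i < B.length →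
    pyTotal (A.set i (A.getD i 0 - 1)) B = pyTotal A B - B.getD i 0 := by
  induction A with
  | nil => intro B i h _; simp at h
  | cons a A ih =>
    intro B i h1 h2
    cases B with
    | nil => simp at h2
    | cons b B =>
      cases i with
      | zero => simp only [List.getD_cons_zero, List.set_cons_zero, tot_cons]; ring
      | succ i =>
        simp only [List.getD_cons_succ, List.set_cons_succ, tot_cons]
        rw [ih B i (by simpa using h1) (by simpa using h2)]; ring

lemma totB (A : List Int) : ∀ (B : List Int) (i : Nat), i < A.length → i < B.length →
    pyTotal A (B.set i (B.getD i 0 - 1)) = pyTotal A B - A.getD i 0 := by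
  induction A with
  | nil => intro B i h _; simp at h
  | cons a A ih =>
    intro B i h1 h2
    cases B with
    | nil => simp at h2
    | cons b B =>
      cases i with
      | zero => simp only [List.getD_cons_zero, List.set_cons_zero, tot_cons]; ring
      | succ i =>
        simp only [List.getD_cons_succ, List.set_cons_succ, tot_cons]
        rw [ih B i (by simpa using h1) (by simpa using h2)]; ring

-- the loop invariant tying A's 5-component state to B's 3-component state
def LoopRel (A B : List Int) (cur : Int) : StA → Int × Int × Bool → Prop
  | (bt, bi, ty, oA, oB), (g, gi, gisa) =>
      bt = cur - g ∧ bi = gi ∧ 0 ≤ g ∧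
      ((g = 0 ∧ gi = -1 ∧ ty = none ∧ oA = none ∧ oB = none) ∨
       (0 < g ∧ 0 ≤ gi ∧ gi < (A.length : Int) ∧
        g = (if gisa then B.getD gi.toNat 0 else A.getD gi.toNat 0) ∧
        ty = some (if gisa then "A" else "B") ∧
        oA = some (if gisa then A.set gi.toNat (A.getD gi.toNat 0 - 1) else A) ∧
        oB = some (if gisa then B else B.set gi.toNat (B.getD gi.toNat 0 - 1))))

lemma phaseA_rel (A B : List Int) (hlen : A.length ≤ B.length) (i : Nat) (hi : i < A.length)
    (sa : StA) (sb : Int × Int × Bool) (h : LoopRel A B (pyTotal A B) sa sb) :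
    LoopRel A B (pyTotal A B)
      (if A.getD i 0 > 0 then
        (if pyTotal (A.set i (A.getD i 0 - 1)) B < sa.1 then
          (pyTotal (A.set i (A.getD i 0 - 1)) B, (i : Int), some "A",
            some (A.set i (A.getD i 0 - 1)), some B)
         else sa)
       else sa)
      (if A.getD i 0 > 0 ∧ B.getD i 0 > sb.1 then (B.getD i 0, (i : Int), true) else sb) := by
  have hiB : i < B.length := lt_of_lt_of_le hi hlen
  obtain ⟨bt, bi, ty, oA, oB⟩ := sa
  obtain ⟨g, gi, gisa⟩ := sb
  obtain ⟨h1, h2, h3, h4⟩ := h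
  rw [totA A B i hi hiB]
  by_cases ha : A.getD i 0 > 0
  · by_cases hb1 : B.getD i 0 > g
    · have hcond : pyTotal A B - B.getD i 0 < bt := by omega
      rw [if_pos ha, if_pos hcond, if_pos ⟨ha, hb1⟩]
      exact ⟨rfl, rfl, by omega, Or.inr ⟨by omega, by omega, by exact_mod_cast hi,
        by simp, rfl, by simp, rfl⟩⟩
    · have hcond : ¬ (pyTotal A B - B.getD i 0 < bt) := by omega
      rw [if_pos ha, if_neg hcond, if_neg (by tauto)]
      exact ⟨h1, h2, h3, h4⟩
  · rw [if_neg ha, if_neg (by tauto)]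
    exact ⟨h1, h2, h3, h4⟩

lemma phaseB_rel (A B : List Int) (hlen : A.length ≤ B.length) (i : Nat) (hi : i < A.length)
    (sa : StA) (sb : Int × Int × Bool) (h : LoopRel A B (pyTotal A B) sa sb) :
    LoopRel A B (pyTotal A B)
      (if B.getD i 0 > 0 then
        (if pyTotal A (B.set i (B.getD i 0 - 1)) < sa.1 then
          (pyTotal A (B.set i (B.getD i 0 - 1)), (i : Int), some "B", some A,
            some (B.set i (B.getD i 0 - 1)))
         else sa)
       else sa)
      (if B.getD i 0 > 0 ∧ A.getD i 0 > sb.1 then (A.getD i 0, (i : Int), false) else sb) := by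
  have hiB : i < B.length := lt_of_lt_of_le hi hlen
  obtain ⟨bt, bi, ty, oA, oB⟩ := sa
  obtain ⟨g, gi, gisa⟩ := sb
  obtain ⟨h1, h2, h3, h4⟩ := h
  rw [totB A B i hi hiB]
  by_cases hb : B.getD i 0 > 0
  · by_cases ha1 : A.getD i 0 > g
    · have hcond : pyTotal A B - A.getD i 0 < bt := by omega
      rw [if_pos hb, if_pos hcond, if_pos ⟨hb, ha1⟩]
      exact ⟨rfl, rfl, by omega, Or.inr ⟨by omega, by omega, by exact_mod_cast hi,
        by simp, rfl, rfl, by simp⟩⟩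
    · have hcond : ¬ (pyTotal A B - A.getD i 0 < bt) := by omega
      rw [if_pos hb, if_neg hcond, if_neg (by tauto)]
      exact ⟨h1, h2, h3, h4⟩
  · rw [if_neg hb, if_neg (by tauto)]
    exact ⟨h1, h2, h3, h4⟩

lemma step_rel (A B : List Int) (hlen : A.length ≤ B.length) (i : Nat) (hi : i < A.length)
    (sa : StA) (sb : Int × Int × Bool) (h : LoopRel A B (pyTotal A B) sa sb) :
    LoopRel A B (pyTotal A B) (stepA A B sa i) (stepB A B sb i) := by
  simp only [stepA, stepB]
  exact phaseB_rel A B hlen i hi _ _ (phaseA_rel A B hlen i hi sa sb h)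

lemma foldl_rel (A B : List Int) (hlen : A.length ≤ B.length) :
    ∀ (l : List Nat), (∀ i ∈ l, i < A.length) → ∀ sa sb, LoopRel A B (pyTotal A B) sa sb →
      LoopRel A B (pyTotal A B) (l.foldl (stepA A B) sa) (l.foldl (stepB A B) sb) := by
  intro l
  induction l with
  | nil => intro _ sa sb h; exact h
  | cons i l ih =>
    intro hl sa sb h
    exact ih (fun j hj => hl j (List.mem_cons_of_mem _ hj)) _ _
      (step_rel A B hlen i (hl i (List.mem_cons_self)) sa sb h)

lemma best_corr (A B : List Int) (hlen : A.length ≤ B.length) :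
    LoopRel A B (pyTotal A B)
      ((List.range A.length).foldl (stepA A B) (pyTotal A B, -1, none, none, none))
      (altBest A B) := by
  refine foldl_rel A B hlen _ (fun i hi => List.mem_range.mp hi) _ _ ?_
  exact ⟨by ring, rfl, le_refl 0, Or.inl ⟨rfl, rfl, rfl, rfl, rfl⟩⟩

lemma oneStep_eq (A B : List Int) (hlen : A.length ≤ B.length) (g gi : Int) (gisa : Bool)
    (hE : altBest A B = (g, gi, gisa)) :
    (gi < 0 → oneStepBest A B = none) ∧
    (0 ≤ gi → gi < (A.length : Int) ∧
      g = (if gisa then B.getD gi.toNat 0 else A.getD gi.toNat 0) ∧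
      oneStepBest A B = some (pyTotal A B - g, gi,
        (if gisa then "A" else "B"),
        (if gisa then A.set gi.toNat (A.getD gi.toNat 0 - 1) else A),
        (if gisa then B else B.set gi.toNat (B.getD gi.toNat 0 - 1)))) := by
  have h := best_corr A B hlen
  rw [hE] at h
  rcases hF : (List.range A.length).foldl (stepA A B) (pyTotal A B, -1, none, none, none)
    with ⟨bt, bi, ty, oA, oB⟩
  rw [hF] at h
  obtain ⟨h1, h2, h3, h4⟩ := h
  constructor
  · intro hneg
    rcases h4 with ⟨hg, hgi, hty, hoA, hoB⟩ | ⟨_, hgi, _⟩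
    · unfold oneStepBest
      rw [hF, hty]
    · omega
  · intro hpos
    rcases h4 with ⟨hg, hgi, hty, hoA, hoB⟩ | ⟨hg, hgi, hlt, hgv, hty, hoA, hoB⟩
    · omega
    · refine ⟨hlt, hgv, ?_⟩
      unfold oneStepBest
      rw [hF, hty, hoA, hoB, h1, h2]

lemma loop_eq : ∀ (m : Nat) (A B : List Int), A.length ≤ B.length →
    altLoop m A B (pyTotal A B) =
      (pyTotal (simLoopA m A B).1 (simLoopA m A B).2, simLoopA m A B) := by
  intro m
  induction m with
  | zero => intro A B _; simp [altLoop, simLoopA]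
  | succ m ih =>
    intro A B hlen
    rcases hE : altBest A B with ⟨g, gi, gisa⟩
    obtain ⟨hneg, hpos⟩ := oneStep_eq A B hlen g gi gisa hE
    by_cases hgi : gi < 0
    · simp [altLoop, hE, hgi, simLoopA, hneg hgi]
    · have hgi0 : 0 ≤ gi := by omega
      obtain ⟨hlt, hgv, hO⟩ := hpos hgi0
      have hbnd : gi.toNat < A.length := by omega
      have hbndB : gi.toNat < B.length := lt_of_lt_of_le hbnd hlen
      have hlen' : (if gisa then A.set gi.toNat (A.getD gi.toNat 0 - 1) else A).length ≤
          (if gisa then B else B.set gi.toNat (B.getD gi.toNat 0 - 1)).length := by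
        cases gisa <;> simpa using hlen
      have htot : pyTotal (if gisa then A.set gi.toNat (A.getD gi.toNat 0 - 1) else A)
          (if gisa then B else B.set gi.toNat (B.getD gi.toNat 0 - 1)) = pyTotal A B - g := by
        cases gisa
        · simp only [Bool.false_eq_true, if_false] at hgv ⊢
          rw [totB A B gi.toNat hbnd hbndB, hgv]
        · simp only [if_true] at hgv ⊢
          rw [totA A B gi.toNat hbnd hbndB, hgv]
      have hstep : altLoop (m + 1) A B (pyTotal A B) =
          altLoop m (if gisa then A.set gi.toNat (A.getD gi.toNat 0 - 1) else A)
            (if gisa then B else B.set gi.toNat (B.getD gi.toNat 0 - 1)) (pyTotal A B - g) := by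
        simp [altLoop, hE, not_lt.mpr hgi0]
      have hsim : simLoopA (m + 1) A B =
          simLoopA m (if gisa then A.set gi.toNat (A.getD gi.toNat 0 - 1) else A)
            (if gisa then B else B.set gi.toNat (B.getD gi.toNat 0 - 1)) := by
        simp [simLoopA, hO]
      rw [hstep, hsim, ← htot]
      exact ih _ _ hlen'

-- ===== VERDICT (by name: the statement is the Claim_ definition above) =====
theorem simulate_k_steps_spec : Claim_equal_simulate_k_steps := by
  intro A B k _ hpre
  unfold Spec_simulate_k_steps simulate_k_steps simulate_k_steps_alt
  by_cases hk : k ≤ 0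
  · have h0 : k.toNat = 0 := Int.toNat_of_nonpos hk
    simp [h0, simLoopA, altLoop]
  · have hlen : A.length ≤ B.length := hpre (by omega)
    rw [loop_eq k.toNat A B hlen]
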